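-- pv_equiv track=rewrite | github.com/sddai/myLeetCode | .ipynb_checkpoints/OD_5-checkpoint.py | find_treasure
-- ===== SOURCE A (Python) =====
-- def find_treasure(nums):
--     n = len(nums)
--     preSum = [0] * n
--     preSum[0] = nums[0]
--     for i in range(1, n):
--         preSum[i] = preSum[i - 1] + nums[i]
--     ans = -1
--     for i in range(n):
--         if i == 0:
--             left = 0
--             right = preSum[n - 1] - preSum[i]
--         elif i == n - 1:
--             left = preSum[i - 1]
--             right = 0
--         else:
--             left = preSum[i - 1]
--             right = preSum[n - 1] - preSum[i]
--         if left == right: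
--             ans = i
--     return ans
-- ===== SOURCE B (Python) =====
-- def find_treasure(nums):
--     total = sum(nums)
--     left = 0
--     ans = -1
--     for i, x in enumerate(nums):
--         if left == total - left - x:
--             ans = i
--         left += x
--     return ans
-- ===== Notes on version B (the rewrite author's own statement) =====
-- stated objective: simpler
-- what changed: Replaces the prefix-sum array plus a second three-branch scan with a single pass keeping only a scalar running left sum (right = total - left - x), with total computed once up front.
import Mathlib
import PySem

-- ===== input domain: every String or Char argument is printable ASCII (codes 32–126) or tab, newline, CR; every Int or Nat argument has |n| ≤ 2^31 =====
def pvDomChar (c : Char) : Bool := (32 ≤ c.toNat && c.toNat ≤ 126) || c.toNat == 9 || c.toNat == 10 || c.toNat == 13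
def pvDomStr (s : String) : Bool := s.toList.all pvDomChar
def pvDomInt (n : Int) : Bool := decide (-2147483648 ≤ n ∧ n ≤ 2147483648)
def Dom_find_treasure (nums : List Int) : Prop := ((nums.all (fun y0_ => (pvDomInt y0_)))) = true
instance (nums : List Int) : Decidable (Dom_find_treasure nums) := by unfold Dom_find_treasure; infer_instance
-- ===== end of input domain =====

-- B replaces A's prefix-sum array and three-branch second scan by a single pass with a
-- scalar running left sum; return value only, no mutation. On [] A raises (see Raises_).

-- ===== PORT A =====
def find_treasure (nums : List Int) : Int :=
  let n : Int := PySem.List.len nums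
  let preSum0 : List Int := List.replicate nums.length 0
  let preSum1 : List Int := PySem.List.pySetD preSum0 0 (PySem.List.pyGetD nums 0 0)
  let preSum : List Int := (PySem.List.pyRange 1 n 1).foldl
    (fun ps i => PySem.List.pySetD ps i (PySem.List.pyGetD ps (i - 1) 0 + PySem.List.pyGetD nums i 0)) preSum1
  (PySem.List.pyRange 0 n 1).foldl
    (fun ans i =>
      let lr : Int × Int :=
        if i = 0 then (0, PySem.List.pyGetD preSum (n - 1) 0 - PySem.List.pyGetD preSum i 0)
        else if i = n - 1 then (PySem.List.pyGetD preSum (i - 1) 0, 0)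
        else (PySem.List.pyGetD preSum (i - 1) 0, PySem.List.pyGetD preSum (n - 1) 0 - PySem.List.pyGetD preSum i 0)
      if lr.1 = lr.2 then i else ans) (-1)

-- ===== PORT B =====
def find_treasure_alt (nums : List Int) : Int :=
  let total : Int := nums.sum
  ((PySem.List.enumerate nums 0).foldl
    (fun (s : Int × Int) p =>
      (if s.2 = total - s.2 - p.2 then p.1 else s.1, s.2 + p.2)) (-1, 0)).1

-- ===== PRECONDITION & SPEC =====
-- Pre_ excludes only the empty list, on which A raises IndexError (nums[0]).
def Pre_find_treasure (nums : List Int) : Prop := nums ≠ []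
instance (nums : List Int) : Decidable (Pre_find_treasure nums) := by unfold Pre_find_treasure; infer_instance
def pvWitness_find_treasure : List Int := [1, -1, 0]

def Spec_find_treasure (nums : List Int) (out : Int) : Prop := out = find_treasure_alt nums
instance (nums : List Int) (out : Int) : Decidable (Spec_find_treasure nums out) := by unfold Spec_find_treasure; infer_instance

-- ===== CLAIM (what is proved, stated in full; the proofs are below) =====
def Claim_equal_find_treasure : Prop := ∀ (nums : List Int), Dom_find_treasure nums → Pre_find_treasure nums → Spec_find_treasure nums (find_treasure nums)

-- ===== LEMMAS AND PROOFS =====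

-- S nums m = sum of the first m elements (what preSum[m-1] holds, and B's running left at step m)
def pvS (nums : List Int) (m : Nat) : Int := (nums.take m).sum

-- the common reference loop both ports reduce to
def pvLoop (total : Int) : List Int → Int → Int → Int → Int
  | [], _, _, ans => ans
  | x :: t, left, i, ans => pvLoop total t (left + x) (i + 1) (if left = total - left - x then i else ans)

theorem pvB_eq_loop (total : Int) (l : List Int) (s ans left : Int) :
    ((PySem.List.enumerate l s).foldl
      (fun (st : Int × Int) p => (if st.2 = total - st.2 - p.2 then p.1 else st.1, st.2 + p.2)) (ans, left)).1
    = pvLoop total l left s ans := by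
  induction l generalizing s ans left with
  | nil => simp [PySem.List.enumerate_nil, pvLoop]
  | cons x t ih => simp [PySem.List.enumerate_cons, pvLoop, ih]

theorem pvS_append (pre : List Int) (x : Int) (t : List Int) :
    pvS (pre ++ x :: t) pre.length = pre.sum ∧ pvS (pre ++ x :: t) (pre.length + 1) = pre.sum + x := by
  constructor
  · simp [pvS, List.take_left']
  · have : (pre ++ x :: t).take (pre.length + 1) = pre ++ [x] := by
      rw [List.take_append]
      simp
    simp [pvS, this]

theorem pvA_fold_eq_loop (nums : List Int) (total : Int) :
    ∀ (l pre : List Int) (ans : Int), nums = pre ++ l →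
    ((List.range' pre.length l.length).foldl
      (fun ans k => if pvS nums k = total - pvS nums (k + 1) then (k : Int) else ans) ans)
    = pvLoop total l pre.sum (pre.length : Int) ans := by
  intro l
  induction l with
  | nil => intro pre ans _; simp [pvLoop]
  | cons x t ih =>
    intro pre ans hn
    rw [List.length_cons, List.range'_succ, List.foldl_cons]
    have h1 := (pvS_append pre x t).1
    have h2 := (pvS_append pre x t).2
    rw [← hn] at h1 h2
    have := ih (pre ++ [x]) (if pvS nums pre.length = total - pvS nums (pre.length + 1) then (pre.length : Int) else ans) (by simpa using hn)
    simp only [List.length_append, List.length_singleton] at this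
    rw [this, pvLoop, h1, h2, List.sum_append]
    simp only [List.sum_cons, List.sum_nil, add_zero]
    push_cast
    ring_nf

-- preSum as built by A's first loop: (range n).map, filled up to j
theorem pvPreSum_build (nums : List Int) (h : nums ≠ []) :
    ∀ j : Nat, 1 ≤ j → j ≤ nums.length →
    ((PySem.List.pyRange 1 (j : Int) 1).foldl
      (fun ps i => PySem.List.pySetD ps i (PySem.List.pyGetD ps (i - 1) 0 + PySem.List.pyGetD nums i 0))
      (PySem.List.pySetD (List.replicate nums.length 0) 0 (PySem.List.pyGetD nums 0 0)))
    = (List.range nums.length).map (fun k => if k < j then pvS nums (k + 1) else 0) := by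
  intro j hj1 hjn
  induction j with
  | zero => omega
  | succ j ih =>
    by_cases hj0 : j = 0
    · subst hj0
      rw [PySem.List.pyRange_one_eq_nil (by norm_num)]
      obtain ⟨a, t, rfl⟩ := List.exists_cons_of_ne_nil h
      simp only [List.foldl_nil]
      rw [PySem.List.pySetD_of_nonneg _ _ (le_refl (0:Int))]
      simp only [Int.toNat_zero]
      apply List.ext_getElem
      · simp
      · intro k hk1 hk2
        simp only [List.length_set, List.length_replicate, List.length_cons] at hk1
        rcases Nat.eq_zero_or_pos k with hk0 | hkpos
        · subst hk0
          simp [PySem.List.pyGetD_zero_cons, pvS, List.getElem_set_self]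
        · rw [List.getElem_set_ne (by omega)]
          simp [List.getElem_replicate, List.getElem_map, List.getElem_range]
          omega
    · have hj : 1 ≤ j := by omega
      have hstep : (1:Int) ≤ j := by exact_mod_cast hj
      have hrange : PySem.List.pyRange 1 ((j:Int) + 1) 1 = PySem.List.pyRange 1 (j:Int) 1 ++ [(j:Int)] := by
        exact PySem.List.pyRange_one_succ_right (by omega)
      have hcast : ((j + 1 : Nat) : Int) = (j : Int) + 1 := by push_cast; ring
      rw [hcast, hrange, List.foldl_append, List.foldl_cons, List.foldl_nil,
          ih hj (by omega)]
      have hjlt : j < nums.length := by omega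
      -- read ps[j-1] = pvS nums j, nums[j]
      have hread : PySem.List.pyGetD ((List.range nums.length).map (fun k => if k < j then pvS nums (k + 1) else 0)) ((j:Int) - 1) 0 = pvS nums j := by
        have hc : ((j:Int) - 1) = ((j - 1 : Nat) : Int) := by omega
        rw [hc, PySem.List.pyGetD_natCast]
        rw [List.getD_eq_getElem _ _ (by simp; omega)]
        simp only [List.getElem_map, List.getElem_range]
        rw [if_pos (by omega)]
        congr 1
        omega
      have hnum : PySem.List.pyGetD nums (j:Int) 0 = nums[j] := by
        rw [PySem.List.pyGetD_natCast, List.getD_eq_getElem _ _ hjlt]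
      rw [hread, hnum, PySem.List.pySetD_of_nonneg _ _ (Int.natCast_nonneg j)]
      simp only [Int.toNat_natCast]
      apply List.ext_getElem
      · simp
      · intro k hk1 hk2
        simp only [List.length_set, List.length_map, List.length_range] at hk1
        by_cases hkj : k = j
        · subst hkj
          rw [List.getElem_set_self (by simpa using hk1)]
          rw [List.getElem_map, List.getElem_range, if_pos (by omega)]
          have : pvS nums (k + 1) = pvS nums k + nums[k] := by
            simp only [pvS]
            exact List.sum_take_succ nums k hjlt
          omega
        · rw [List.getElem_set_ne (by omega)]
          simp only [List.getElem_map, List.getElem_range]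
          by_cases hlt : k < j
          · rw [if_pos hlt, if_pos (by omega)]
          · rw [if_neg hlt, if_neg (by omega)]

theorem pvA_eq_loop (nums : List Int) (h : nums ≠ []) :
    find_treasure nums = pvLoop nums.sum nums 0 0 (-1) := by
  have hn1 : 1 ≤ nums.length := List.length_pos_of_ne_nil h
  unfold find_treasure
  simp only [PySem.List.len_eq]
  rw [pvPreSum_build nums h nums.length hn1 (le_refl _)]
  have hfull : ∀ k : Nat, k < nums.length →
      PySem.List.pyGetD ((List.range nums.length).map (fun k => if k < nums.length then pvS nums (k + 1) else 0)) (k : Int) 0 = pvS nums (k + 1) := by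
    intro k hk
    rw [PySem.List.pyGetD_natCast, List.getD_eq_getElem _ _ (by simpa using hk)]
    simp only [List.getElem_map, List.getElem_range]
    rw [if_pos hk]
  have hrange0 : PySem.List.pyRange 0 (nums.length : Int) 1 = (List.range nums.length).map (fun k : Nat => (k : Int)) := by
    exact PySem.List.pyRange_zero_nat nums.length
  rw [hrange0, List.foldl_map]
  refine Eq.trans (PySem.List.foldl_congr_mem _ _
    (fun ans k => if pvS nums k = nums.sum - pvS nums (k + 1) then (k : Int) else ans) _ ?_) ?_
  · intro ans k hkmem
    have hk : k < nums.length := List.mem_range.mp hkmem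
    have hSn : PySem.List.pyGetD ((List.range nums.length).map (fun k => if k < nums.length then pvS nums (k + 1) else 0)) ((nums.length : Int) - 1) 0 = nums.sum := by
      have hc : ((nums.length : Int) - 1) = ((nums.length - 1 : Nat) : Int) := by omega
      rw [hc, hfull (nums.length - 1) (by omega)]
      have he : nums.length - 1 + 1 = nums.length := by omega
      rw [he]
      simp [pvS]
    have hSk1 := hfull k hk
    by_cases hk0 : k = 0
    · subst hk0
      have h0 : pvS nums 0 = 0 := by simp [pvS]
      have hS1 := hfull 0 hk
      simp only [Nat.cast_zero] at hS1 ⊢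
      simp [hSn, hS1, h0]
    · have hne0 : (k : Int) ≠ 0 := by exact_mod_cast hk0
      have hkm : ((k : Int) - 1) = ((k - 1 : Nat) : Int) := by omega
      have hSkm : PySem.List.pyGetD ((List.range nums.length).map (fun k => if k < nums.length then pvS nums (k + 1) else 0)) ((k : Int) - 1) 0 = pvS nums k := by
        rw [hkm, hfull (k - 1) (by omega)]
        congr 1
        omega
      by_cases hklast : k = nums.length - 1
      · have hke : (k : Int) = (nums.length : Int) - 1 := by omega
        simp only [if_neg hne0, if_pos hke, hSkm]
        have hSn' : pvS nums (k + 1) = nums.sum := by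
          have he : k + 1 = nums.length := by omega
          simp [pvS, he]
        rw [hSn']
        by_cases hc : pvS nums k = 0
        · rw [if_pos hc, if_pos (by omega)]
        · rw [if_neg hc, if_neg (by omega)]
      · have hne1 : (k : Int) ≠ (nums.length : Int) - 1 := by
          intro hc; apply hklast; omega
        simp only [if_neg hne0, if_neg hne1, hSkm, hSn, hSk1]
  · rw [List.range_eq_range']
    have := pvA_fold_eq_loop nums nums.sum nums [] (-1) (by simp)
    simpa using this

-- ===== VERDICT (by name: the statement is the Claim_ definition above) =====
theorem find_treasure_spec : Claim_equal_find_treasure := by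
  intro nums _ hpre
  unfold Spec_find_treasure
  rw [pvA_eq_loop nums hpre]
  unfold find_treasure_alt
  rw [pvB_eq_loop]
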